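-- pv_equiv track=rewrite | github.com/Dopiz/LeetCode | Codility/Lesson 6 Triangle.py | solution
-- ===== SOURCE A (Python) =====
-- def solution(A):
--     # write your code in Python 3.6
--     if len(A) < 3:
--         return 0
--
--     A = sorted(A)
--
--     for i in range(2, len(A)):
--         if A[i - 2] + A[i - 1] > A[i]:
--             return 1
--
--     return 0
-- ===== SOURCE B (Python) =====
-- def solution(A):
--     n = len(A)
--     for i in range(0, n - 2):
--         for j in range(i + 1, n - 1):
--             for k in range(j + 1, n):
--                 x, y, z = A[i], A[j], A[k]
--                 if x + y > z and x + z > y and y + z > x: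
--                     return 1
--     return 0
-- ===== Notes on version B (the rewrite author's own statement) =====
-- stated objective: alternative
-- what changed: Replaced sort-then-adjacent-scan by a direct brute-force scan over all index triples testing the full triangle inequality, with no sorting and no length guard.
import Mathlib
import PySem

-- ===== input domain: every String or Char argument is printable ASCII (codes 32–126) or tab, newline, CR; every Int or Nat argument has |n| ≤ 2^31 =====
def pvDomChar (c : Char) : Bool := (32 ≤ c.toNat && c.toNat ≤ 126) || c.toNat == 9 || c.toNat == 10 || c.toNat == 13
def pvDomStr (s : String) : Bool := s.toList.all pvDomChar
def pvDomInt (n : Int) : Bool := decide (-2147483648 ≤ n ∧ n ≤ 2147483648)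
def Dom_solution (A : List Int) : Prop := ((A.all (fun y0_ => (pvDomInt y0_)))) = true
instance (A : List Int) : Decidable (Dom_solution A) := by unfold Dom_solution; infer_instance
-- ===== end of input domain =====

-- B replaces A's sort-then-adjacent-scan by a brute-force scan over all index
-- triples testing the full triangle inequality (alternative algorithm, no sort).

-- ===== PORT A =====
def solution (A : List Int) : Int :=
  if A.length < 3 then 0
  else
    let S := PySem.List.sorted A (fun x => x) false
    if (PySem.List.pyRange 2 (S.length : Int) 1).any (fun i =>
        decide (PySem.List.pyGetD S (i - 2) 0 + PySem.List.pyGetD S (i - 1) 0 > PySem.List.pyGetD S i 0))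
    then 1 else 0

-- ===== PORT B =====
def triB (x y z : Int) : Bool := decide (x + y > z) && decide (x + z > y) && decide (y + z > x)

def solution_alt (A : List Int) : Int :=
  let n : Int := A.length
  if (PySem.List.pyRange 0 (n - 2) 1).any (fun i =>
      (PySem.List.pyRange (i + 1) (n - 1) 1).any (fun j =>
        (PySem.List.pyRange (j + 1) n 1).any (fun k =>
          triB (PySem.List.pyGetD A i 0) (PySem.List.pyGetD A j 0) (PySem.List.pyGetD A k 0))))
  then 1 else 0

-- ===== PRECONDITION & SPEC =====
def Spec_solution (A : List Int) (out : Int) : Prop := out = solution_alt A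
instance (A : List Int) (out : Int) : Decidable (Spec_solution A out) := by unfold Spec_solution; infer_instance

-- ===== CLAIM (what is proved, stated in full; the proofs are below) =====
def Claim_equal_solution : Prop := ∀ (A : List Int), Dom_solution A → Spec_solution A (solution A)

-- ===== LEMMAS AND PROOFS =====

/-- Some three positions (in order) carry values forming a triangle. -/
def ExTri (l : List Int) : Prop :=
  ∃ i j k : Nat, i < j ∧ j < k ∧ k < l.length ∧
    l.getD i 0 + l.getD j 0 > l.getD k 0 ∧
    l.getD i 0 + l.getD k 0 > l.getD j 0 ∧
    l.getD j 0 + l.getD k 0 > l.getD i 0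

/-- Some adjacent triple satisfies A's test. -/
def AdjTri (l : List Int) : Prop :=
  ∃ m : Nat, 2 ≤ m ∧ m < l.length ∧ l.getD (m - 2) 0 + l.getD (m - 1) 0 > l.getD m 0

/-- Ordered-triple form, stable under permutation of `l`. -/
def StTri (l : List Int) : Prop :=
  ∃ x y z : Int, x ≤ y ∧ y ≤ z ∧ x + y > z ∧ List.Subperm [x, y, z] l

lemma pyGetD_toNat (l : List Int) (i : Int) (h0 : 0 ≤ i) (h1 : i < (l.length : Int)) :
    PySem.List.pyGetD l i 0 = l.getD i.toNat 0 := by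
  rw [PySem.List.pyGetD_eq_getElem l 0 h0 h1, List.getD_eq_getElem l 0 (by omega)]

lemma getD_mono (l : List Int) (hp : l.Pairwise (· ≤ ·)) (i j : Nat)
    (hij : i ≤ j) (hj : j < l.length) : l.getD i 0 ≤ l.getD j 0 := by
  rcases Nat.lt_or_ge i j with h | h
  · rw [List.getD_eq_getElem l 0 (by omega), List.getD_eq_getElem l 0 hj]
    exact List.pairwise_iff_getElem.mp hp i j (by omega) hj h
  · have : i = j := by omega
    subst this; exact le_refl _

lemma perm_pair (b c y z : Int) (h : [b, c].Perm [y, z]) :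
    (b = y ∧ c = z) ∨ (b = z ∧ c = y) := by
  have hb : b ∈ [y, z] := h.mem_iff.mp (by simp)
  simp at hb
  rcases hb with hb | hb
  · subst hb
    have : [c].Perm [z] := h.cons_inv
    simp [List.perm_singleton] at this
    exact Or.inl ⟨rfl, this⟩
  · subst hb
    have h2 : [b, c].Perm [b, y] := h.trans (List.Perm.swap _ _ _)
    have : [c].Perm [y] := h2.cons_inv
    simp [List.perm_singleton] at this
    exact Or.inr ⟨rfl, this⟩

lemma perm_triple (a b c x y z : Int) (h : [a, b, c].Perm [x, y, z]) :
    (a = x ∧ b = y ∧ c = z) ∨ (a = x ∧ b = z ∧ c = y) ∨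
    (a = y ∧ b = x ∧ c = z) ∨ (a = y ∧ b = z ∧ c = x) ∨
    (a = z ∧ b = x ∧ c = y) ∨ (a = z ∧ b = y ∧ c = x) := by
  have ha : a ∈ [x, y, z] := h.mem_iff.mp (by simp)
  simp at ha
  rcases ha with ha | ha | ha
  · subst ha
    rcases perm_pair b c y z h.cons_inv with ⟨h1, h2⟩ | ⟨h1, h2⟩
    · exact Or.inl ⟨rfl, h1, h2⟩
    · exact Or.inr (Or.inl ⟨rfl, h1, h2⟩)
  · subst ha
    have h2 : [a, b, c].Perm (a :: [x, z]) := h.trans (List.Perm.swap a x [z])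
    rcases perm_pair b c x z h2.cons_inv with ⟨h1, h3⟩ | ⟨h1, h3⟩
    · exact Or.inr (Or.inr (Or.inl ⟨rfl, h1, h3⟩))
    · exact Or.inr (Or.inr (Or.inr (Or.inl ⟨rfl, h1, h3⟩)))
  · subst ha
    have h2 : [a, b, c].Perm (a :: [x, y]) :=
      h.trans (((List.Perm.swap a y []).cons x).trans (List.Perm.swap a x [y]))
    rcases perm_pair b c x y h2.cons_inv with ⟨h1, h3⟩ | ⟨h1, h3⟩
    · exact Or.inr (Or.inr (Or.inr (Or.inr (Or.inl ⟨rfl, h1, h3⟩))))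
    · exact Or.inr (Or.inr (Or.inr (Or.inr (Or.inr ⟨rfl, h1, h3⟩))))

lemma sublist_of_indices (l : List Int) (i j k : Nat)
    (hij : i < j) (hjk : j < k) (hk : k < l.length) :
    List.Sublist [l.getD i 0, l.getD j 0, l.getD k 0] l := by
  have hi : i < l.length := by omega
  have hj : j < l.length := by omega
  have := List.map_getElem_sublist (l := l)
    (is := [⟨i, hi⟩, ⟨j, hj⟩, ⟨k, hk⟩]) (by simp [List.pairwise_cons]; omega)
  rw [List.getD_eq_getElem l 0 hi, List.getD_eq_getElem l 0 hj,
    List.getD_eq_getElem l 0 hk]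
  simpa using this

lemma exTri_to_stTri (l : List Int) (h : ExTri l) : StTri l := by
  obtain ⟨i, j, k, hij, hjk, hk, t1, t2, t3⟩ := h
  set a := l.getD i 0 with ha
  set b := l.getD j 0 with hb
  set c := l.getD k 0 with hc
  have hsub : List.Sublist [a, b, c] l := sublist_of_indices l i j k hij hjk hk
  -- order a, b, c
  have pacb : [a, b, c].Perm [a, c, b] := (List.Perm.swap c b []).cons a
  have pcab : [a, b, c].Perm [c, a, b] := pacb.trans (List.Perm.swap c a [b])
  have pbac : [a, b, c].Perm [b, a, c] := List.Perm.swap b a [c]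
  have pbca : [a, b, c].Perm [b, c, a] := pbac.trans ((List.Perm.swap c a []).cons b)
  have pcba : [a, b, c].Perm [c, b, a] := pcab.trans ((List.Perm.swap b a []).cons c)
  rcases le_total a b with h1 | h1 <;> rcases le_total b c with h2 | h2 <;>
    rcases le_total a c with h3 | h3
  · exact ⟨a, b, c, by omega, by omega, by omega, ⟨[a, b, c], List.Perm.refl _, hsub⟩⟩
  · exact ⟨a, b, c, by omega, by omega, by omega, ⟨[a, b, c], List.Perm.refl _, hsub⟩⟩
  · exact ⟨a, c, b, by omega, by omega, by omega, ⟨[a, b, c], pacb, hsub⟩⟩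
  · exact ⟨c, a, b, by omega, by omega, by omega, ⟨[a, b, c], pcab, hsub⟩⟩
  · exact ⟨b, a, c, by omega, by omega, by omega, ⟨[a, b, c], pbac, hsub⟩⟩
  · exact ⟨b, c, a, by omega, by omega, by omega, ⟨[a, b, c], pbca, hsub⟩⟩
  · exact ⟨c, b, a, by omega, by omega, by omega, ⟨[a, b, c], pcba, hsub⟩⟩
  · exact ⟨c, b, a, by omega, by omega, by omega, ⟨[a, b, c], pcba, hsub⟩⟩

lemma stTri_to_exTri (l : List Int) (h : StTri l) : ExTri l := by
  obtain ⟨x, y, z, hxy, hyz, hsum, t, hperm, hsub⟩ := h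
  obtain ⟨is, his, hpw⟩ := List.sublist_eq_map_getElem hsub
  -- t has length 3
  have hlen : is.length = 3 := by
    have := hperm.length_eq
    simp [his] at this ⊢
    omega
  match is, hlen with
  | [i, j, k], _ =>
    subst his
    simp only [List.map_cons, List.map_nil, Fin.getElem_fin] at hperm hsub
    simp only [List.pairwise_cons, List.mem_cons] at hpw
    have hij : (i : Nat) < (j : Nat) := hpw.1 j (Or.inl rfl)
    have hjk : (j : Nat) < (k : Nat) := hpw.2.1 k (Or.inl rfl)
    have htri : l[(i : Nat)] + l[(j : Nat)] > l[(k : Nat)] ∧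
        l[(i : Nat)] + l[(k : Nat)] > l[(j : Nat)] ∧
        l[(j : Nat)] + l[(k : Nat)] > l[(i : Nat)] := by
      rcases perm_triple _ _ _ _ _ _ hperm with
        ⟨e1, e2, e3⟩ | ⟨e1, e2, e3⟩ | ⟨e1, e2, e3⟩ | ⟨e1, e2, e3⟩ | ⟨e1, e2, e3⟩ | ⟨e1, e2, e3⟩ <;>
        rw [e1, e2, e3] <;> omega
    refine ⟨i, j, k, hij, hjk, k.isLt, ?_, ?_, ?_⟩ <;>
      rw [List.getD_eq_getElem l 0 i.isLt, List.getD_eq_getElem l 0 j.isLt,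
        List.getD_eq_getElem l 0 k.isLt] <;> omega

lemma stTri_perm (l l' : List Int) (hp : l.Perm l') (h : StTri l) : StTri l' := by
  obtain ⟨x, y, z, h1, h2, h3, hsp⟩ := h
  exact ⟨x, y, z, h1, h2, h3, hsp.trans hp.subperm⟩

lemma adjTri_to_exTri (l : List Int) (hp : l.Pairwise (· ≤ ·)) (h : AdjTri l) : ExTri l := by
  obtain ⟨m, hm2, hml, hsum⟩ := h
  have h1 : l.getD (m - 2) 0 ≤ l.getD (m - 1) 0 := getD_mono l hp _ _ (by omega) (by omega)
  have h2 : l.getD (m - 1) 0 ≤ l.getD m 0 := getD_mono l hp _ _ (by omega) hml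
  exact ⟨m - 2, m - 1, m, by omega, by omega, hml, by omega, by omega, by omega⟩

lemma stTri_to_adjTri (l : List Int) (hp : l.Pairwise (· ≤ ·)) (h : StTri l) : AdjTri l := by
  obtain ⟨x, y, z, hxy, hyz, hsum, t, hperm, hsub⟩ := h
  have ht : t = [x, y, z] := by
    have hq : List.Pairwise (fun a b : Int => a ≤ b) [x, y, z] := by
      refine .cons ?_ (.cons ?_ (List.pairwise_singleton _ _))
      · intro a ha; simp at ha; rcases ha with rfl | rfl <;> omega
      · intro a ha; simp at ha; subst ha; omega
    exact List.Perm.eq_of_pairwise (fun a b _ _ hab hba => le_antisymm hab hba)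
      (List.Pairwise.sublist hsub hp) hq hperm
  subst ht
  obtain ⟨is, his, hpw⟩ := List.sublist_eq_map_getElem hsub
  have hlen : is.length = 3 := by
    have : ([x, y, z] : List Int).length = (is.map fun i => l[i]).length := by rw [← his]
    simpa using this.symm
  match is, hlen with
  | [i, j, k], _ =>
    simp only [List.map_cons, List.map_nil, Fin.getElem_fin, List.cons.injEq,
      and_true] at his
    obtain ⟨hv1, hv2, hv3⟩ := his
    simp only [List.pairwise_cons, List.mem_cons] at hpw
    have hij : (i : Nat) < (j : Nat) := hpw.1 j (Or.inl rfl)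
    have hjk : (j : Nat) < (k : Nat) := hpw.2.1 k (Or.inl rfl)
    refine ⟨k, by omega, k.isLt, ?_⟩
    have e1 : l.getD (k - 2 : Nat) 0 ≥ x := by
      rw [hv1]
      have := getD_mono l hp i (k - 2) (by omega) (by omega)
      rwa [List.getD_eq_getElem l 0 i.isLt] at this
    have e2 : l.getD (k - 1 : Nat) 0 ≥ y := by
      rw [hv2]
      have := getD_mono l hp j (k - 1) (by omega) (by omega)
      rwa [List.getD_eq_getElem l 0 j.isLt] at this
    have e3 : l.getD (k : Nat) 0 = z := by
      rw [hv3]; exact List.getD_eq_getElem l 0 k.isLt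
    omega

lemma anyA_iff (S : List Int) :
    ((PySem.List.pyRange 2 (S.length : Int) 1).any (fun i =>
        decide (PySem.List.pyGetD S (i - 2) 0 + PySem.List.pyGetD S (i - 1) 0 >
          PySem.List.pyGetD S i 0)) = true) ↔ AdjTri S := by
  rw [List.any_eq_true]
  constructor
  · rintro ⟨i, hmem, hdec⟩
    rw [PySem.List.mem_pyRange_one] at hmem
    obtain ⟨h2, hlt⟩ := hmem
    simp only [decide_eq_true_eq] at hdec
    rw [pyGetD_toNat S (i - 2) (by omega) (by omega),
        pyGetD_toNat S (i - 1) (by omega) (by omega),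
        pyGetD_toNat S i (by omega) (by omega)] at hdec
    refine ⟨i.toNat, by omega, by omega, ?_⟩
    have e1 : (i - 2).toNat = i.toNat - 2 := by omega
    have e2 : (i - 1).toNat = i.toNat - 1 := by omega
    rwa [e1, e2] at hdec
  · rintro ⟨m, hm2, hml, hsum⟩
    refine ⟨(m : Int), ?_, ?_⟩
    · rw [PySem.List.mem_pyRange_one]; omega
    · simp only [decide_eq_true_eq]
      rw [pyGetD_toNat S ((m : Int) - 2) (by omega) (by omega),
          pyGetD_toNat S ((m : Int) - 1) (by omega) (by omega),
          pyGetD_toNat S (m : Int) (by omega) (by omega)]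
      have e1 : ((m : Int) - 2).toNat = m - 2 := by omega
      have e2 : ((m : Int) - 1).toNat = m - 1 := by omega
      have e3 : ((m : Int)).toNat = m := by omega
      rw [e1, e2, e3]
      exact hsum

lemma anyB_iff (A : List Int) :
    ((PySem.List.pyRange 0 ((A.length : Int) - 2) 1).any (fun i =>
      (PySem.List.pyRange (i + 1) ((A.length : Int) - 1) 1).any (fun j =>
        (PySem.List.pyRange (j + 1) (A.length : Int) 1).any (fun k =>
          triB (PySem.List.pyGetD A i 0) (PySem.List.pyGetD A j 0)
            (PySem.List.pyGetD A k 0)))) = true) ↔ ExTri A := by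
  simp only [List.any_eq_true, PySem.List.mem_pyRange_one, triB, Bool.and_eq_true,
    decide_eq_true_eq]
  constructor
  · rintro ⟨i, ⟨hi0, hi1⟩, j, ⟨hj0, hj1⟩, k, ⟨hk0, hk1⟩, ⟨t1, t2⟩, t3⟩
    rw [pyGetD_toNat A i (by omega) (by omega),
        pyGetD_toNat A j (by omega) (by omega),
        pyGetD_toNat A k (by omega) (by omega)] at t1 t2 t3
    exact ⟨i.toNat, j.toNat, k.toNat, by omega, by omega, by omega, t1, t2, t3⟩
  · rintro ⟨i, j, k, hij, hjk, hk, t1, t2, t3⟩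
    refine ⟨(i : Int), ⟨by omega, by omega⟩, (j : Int), ⟨by omega, by omega⟩,
      (k : Int), ⟨by omega, by omega⟩, ?_⟩
    rw [pyGetD_toNat A (i : Int) (by omega) (by omega),
        pyGetD_toNat A (j : Int) (by omega) (by omega),
        pyGetD_toNat A (k : Int) (by omega) (by omega)]
    simp only [Int.toNat_natCast]
    exact ⟨⟨t1, t2⟩, t3⟩

lemma exTri_length (l : List Int) (h : ExTri l) : 3 ≤ l.length := by
  obtain ⟨i, j, k, hij, hjk, hk, _⟩ := h
  omega

lemma main_eq (A : List Int) : solution A = solution_alt A := by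
  set S := PySem.List.sorted A (fun x => x) false with hS
  have hAdef : solution A = if A.length < 3 then 0 else
      (if (PySem.List.pyRange 2 (S.length : Int) 1).any (fun i =>
        decide (PySem.List.pyGetD S (i - 2) 0 + PySem.List.pyGetD S (i - 1) 0 >
          PySem.List.pyGetD S i 0)) then 1 else 0) := rfl
  have hBdef : solution_alt A = if (PySem.List.pyRange 0 ((A.length : Int) - 2) 1).any (fun i =>
      (PySem.List.pyRange (i + 1) ((A.length : Int) - 1) 1).any (fun j =>
        (PySem.List.pyRange (j + 1) (A.length : Int) 1).any (fun k =>
          triB (PySem.List.pyGetD A i 0) (PySem.List.pyGetD A j 0)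
            (PySem.List.pyGetD A k 0)))) then 1 else 0 := rfl
  rw [hAdef, hBdef]
  have hperm : S.Perm A := PySem.List.sorted_perm A (fun x => x) false
  have hpw : S.Pairwise (· ≤ ·) := by
    have := PySem.List.sorted_pairwise A (fun x => x)
    simpa [hS] using this
  have hiff : ExTri A ↔ AdjTri S := by
    constructor
    · intro h
      exact stTri_to_adjTri S hpw (stTri_perm A S hperm.symm (exTri_to_stTri A h))
    · intro h
      exact stTri_to_exTri A (stTri_perm S A hperm (exTri_to_stTri S (adjTri_to_exTri S hpw h)))
  by_cases h3 : A.length < 3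
  · rw [if_pos h3]
    have hB : ¬ ExTri A := fun h => by have := exTri_length A h; omega
    rw [← anyB_iff] at hB
    simp only [Bool.not_eq_true] at hB
    rw [hB]
    simp
  · rw [if_neg h3]
    by_cases hA : AdjTri S
    · rw [if_pos ((anyA_iff S).mpr hA), if_pos ((anyB_iff A).mpr (hiff.mpr hA))]
    · rw [if_neg (fun hc => hA ((anyA_iff S).mp hc)),
        if_neg (fun hc => hA (hiff.mp ((anyB_iff A).mp hc)))]

-- ===== VERDICT (by name: the statement is the Claim_ definition above) =====
theorem solution_spec : Claim_equal_solution := by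
  intro A _
  unfold Spec_solution
  exact main_eq A
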